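-- pv_equiv track=rewrite | github.com/itsp-ris/code-inventory | FIT3155-huffman-lempel-ziv-storer-szymanski-algorithm-assignment/task2/genPrime.py | repeatedSquaring
-- ===== SOURCE A (Python) =====
-- def repeatedSquaring(base, exp, mod, res):
--     '''
--     function performs modular exponentiation by repeated squaring
--     precondition:
--     :param base: the base value
--            exp: the exponent
--            mod: the modular value
--            res: array storing consecutive modular exponentiation result
--     postcondition:
--     :return: the array storing consecutive modular exponentiation result
--     complexity: time: best and worst: O(m) where m is the exponent
--                 space: O(m) where m is the exponent
--     error handling:
--     '''
--     # base case
--     if exp == 0: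
--         res += [int(base % mod)]
--         return res
--     # recursive case
--     else:
--         repeatedSquaring(base, exp - 1, mod, res)
--         res += [int(res[-1] * res[-1] % mod)]
--         return res
-- ===== SOURCE B (Python) =====
-- def repeatedSquaring(base, exp, mod, res):
--     cur = int(base % mod)
--     res += [cur]
--     for _ in range(exp):
--         cur = int(cur * cur % mod)
--         res += [cur]
--     return res
-- ===== Notes on version B (the rewrite author's own statement) =====
-- stated objective: idiomatic
-- what changed: Replaced the linear recursion (one Python stack frame per exponent step, appending after the recursive call returns) by a single explicit loop that carries the current residue in a variable and appends as it goes; same in-place mutation of res.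
import Mathlib
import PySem

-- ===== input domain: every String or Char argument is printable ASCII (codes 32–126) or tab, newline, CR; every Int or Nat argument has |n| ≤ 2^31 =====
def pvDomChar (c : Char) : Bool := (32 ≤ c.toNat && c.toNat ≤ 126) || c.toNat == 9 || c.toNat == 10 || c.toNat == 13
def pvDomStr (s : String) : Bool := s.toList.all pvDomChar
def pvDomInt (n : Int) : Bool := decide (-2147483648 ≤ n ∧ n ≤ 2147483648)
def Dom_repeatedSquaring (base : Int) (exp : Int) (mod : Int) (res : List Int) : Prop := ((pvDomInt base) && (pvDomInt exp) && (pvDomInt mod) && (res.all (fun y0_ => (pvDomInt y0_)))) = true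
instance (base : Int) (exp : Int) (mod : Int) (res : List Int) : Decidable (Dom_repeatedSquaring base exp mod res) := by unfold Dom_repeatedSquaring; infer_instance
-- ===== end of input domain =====

-- B replaces A's linear recursion by an explicit accumulator loop (same sequence, same
-- in-place append to res; equivalence is about the returned value).

-- ===== PORT A =====
-- A recurses on exp; the recursion terminates only for 0 ≤ exp (Pre_), so the port
-- recurses on exp.toNat, which is exact on that domain.  res[-1] is total after the
-- recursive call; the `none` branch (Python IndexError) is unreachable there.
def repeatedSquaringAux (base : Int) (mod : Int) : Nat → List Int → List Int
  | 0, res => res ++ [PySem.Int.mod base mod]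
  | Nat.succ k, res =>
    let r := repeatedSquaringAux base mod k res
    r ++ [match PySem.List.pyGet? r (-1) with
          | some x => PySem.Int.mod (x * x) mod
          | none => 0]

def repeatedSquaring (base : Int) (exp : Int) (mod : Int) (res : List Int) : List Int :=
  repeatedSquaringAux base mod exp.toNat res

-- ===== PORT B =====
def repeatedSquaring_alt (base : Int) (exp : Int) (mod : Int) (res : List Int) : List Int :=
  let cur := PySem.Int.mod base mod
  let res1 := res ++ [cur]
  let st := (PySem.List.pyRange 0 exp 1).foldl
    (fun (p : List Int × Int) _ =>
      let c := PySem.Int.mod (p.2 * p.2) mod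
      (p.1 ++ [c], c)) (res1, cur)
  st.1

-- ===== PRECONDITION & SPEC =====
-- Python A raises RecursionError for exp < 0 and ZeroDivisionError for mod = 0.
def Pre_repeatedSquaring (base : Int) (exp : Int) (mod : Int) (res : List Int) : Prop :=
  0 ≤ exp ∧ mod ≠ 0
instance (base : Int) (exp : Int) (mod : Int) (res : List Int) : Decidable (Pre_repeatedSquaring base exp mod res) := by unfold Pre_repeatedSquaring; infer_instance
def pvWitness_repeatedSquaring : Int × Int × Int × List Int := (3, 4, 7, [1])

def Spec_repeatedSquaring (base : Int) (exp : Int) (mod : Int) (res : List Int) (out : List Int) : Prop := out = repeatedSquaring_alt base exp mod res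
instance (base : Int) (exp : Int) (mod : Int) (res : List Int) (out : List Int) : Decidable (Spec_repeatedSquaring base exp mod res out) := by unfold Spec_repeatedSquaring; infer_instance

-- ===== CLAIM (what is proved, stated in full; the proofs are below) =====
def Claim_equal_repeatedSquaring : Prop := ∀ (base : Int) (exp : Int) (mod : Int) (res : List Int), Dom_repeatedSquaring base exp mod res → Pre_repeatedSquaring base exp mod res → Spec_repeatedSquaring base exp mod res (repeatedSquaring base exp mod res)

-- ===== LEMMAS AND PROOFS =====

-- Loop invariant: after n steps of B's fold, the list equals A's recursion result and
-- the carried residue is its last element.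
theorem aux_eq_fold (base mod_ : Int) : ∀ (n : Nat) (res : List Int),
    (((PySem.List.pyRange 0 (n : Int) 1).foldl
        (fun (p : List Int × Int) _ =>
          let c := PySem.Int.mod (p.2 * p.2) mod_
          (p.1 ++ [c], c))
        (res ++ [PySem.Int.mod base mod_], PySem.Int.mod base mod_)).1
        = repeatedSquaringAux base mod_ n res)
    ∧ PySem.List.pyGet? (repeatedSquaringAux base mod_ n res) (-1)
        = some ((PySem.List.pyRange 0 (n : Int) 1).foldl
        (fun (p : List Int × Int) _ =>
          let c := PySem.Int.mod (p.2 * p.2) mod_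
          (p.1 ++ [c], c))
        (res ++ [PySem.Int.mod base mod_], PySem.Int.mod base mod_)).2 := by
  intro n
  induction n with
  | zero =>
    intro res
    simp [repeatedSquaringAux,
      PySem.List.pyGet?_neg_one_append_singleton]
  | succ k ih =>
    intro res
    have hsplit : PySem.List.pyRange 0 ((k + 1 : Nat) : Int) 1
        = PySem.List.pyRange 0 (k : Int) 1 ++ [(k : Int)] := by
      have := PySem.List.pyRange_one_succ_right (a := 0) (b := (k : Int)) (by positivity)
      push_cast
      exact this
    obtain ⟨h1, h2⟩ := ih res
    rw [hsplit, List.foldl_append]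
    constructor
    · simp only [List.foldl_cons, List.foldl_nil]
      simp only [repeatedSquaringAux, h1, h2]
    · simp only [List.foldl_cons, List.foldl_nil]
      simp only [repeatedSquaringAux, h2]
      exact PySem.List.pyGet?_neg_one_append_singleton _ _

-- ===== VERDICT (by name: the statement is the Claim_ definition above) =====
theorem repeatedSquaring_spec : Claim_equal_repeatedSquaring := by
  intro base exp mod_ res _ hpre
  unfold Spec_repeatedSquaring repeatedSquaring repeatedSquaring_alt
  have h := (aux_eq_fold base mod_ exp.toNat res).1
  rw [Int.toNat_of_nonneg hpre.1] at h
  exact h.symm
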